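-- pv_equiv track=rewrite | github.com/pohily/checkio | convert.py | convert
-- ===== SOURCE A (Python) =====
-- def convert(numerator, denominator):
--     whole = str(numerator // denominator)
--     fraction, num = '', []
--     if numerator % denominator != 0:
--         numerator %= denominator
--         while True:
--             numerator *=10
--             if numerator % denominator != 0:
--                 fraction += str(numerator // denominator)
--                 num.append(numerator)
--                 numerator %= denominator
--
--                 # check for cycle
--                 if len(fraction) > 1:
--                     for i in range(len(fraction)//2):
--                         if fraction[len(fraction)-(i+1):]*2 == fraction[len(fraction)-(i+1)*2:] and num[-(i+1)] == num[-(i+1)*2]: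
--                             cycle = fraction[len(fraction)-(i+1):]
--                             precycle = fraction[:len(fraction)-(i+1)*2]
--                             return whole + '.' + precycle + '(' + cycle +')'
--             else:
--                 fraction += str(numerator // denominator)
--                 return whole + '.' + fraction
--     return whole + '.' + fraction
-- ===== SOURCE B (Python) =====
-- def convert(numerator, denominator):
--     whole = str(numerator // denominator)
--     rem = numerator % denominator
--     if rem == 0:
--         return whole + '.'
--     digits = []
--     seen = {}
--     while rem != 0 and rem not in seen:
--         seen[rem] = len(digits)
--         rem *= 10
--         digits.append(str(rem // denominator))
--         rem %= denominator
--     if rem == 0: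
--         return whole + '.' + ''.join(digits)
--     p = seen[rem]
--     return whole + '.' + ''.join(digits[:p]) + '(' + ''.join(digits[p:]) + ')'
-- ===== Notes on version B (the rewrite author's own statement) =====
-- stated objective: faster
-- what changed: Replaced A's per-digit suffix-doubling cycle search (a rescans of growing fraction/num suffixes after every digit, which only fires after p+2k digits) by one-pass long division that stores each remainder's first position in a dict and stops at the first repeated remainder (p+k digits).
import Mathlib
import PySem

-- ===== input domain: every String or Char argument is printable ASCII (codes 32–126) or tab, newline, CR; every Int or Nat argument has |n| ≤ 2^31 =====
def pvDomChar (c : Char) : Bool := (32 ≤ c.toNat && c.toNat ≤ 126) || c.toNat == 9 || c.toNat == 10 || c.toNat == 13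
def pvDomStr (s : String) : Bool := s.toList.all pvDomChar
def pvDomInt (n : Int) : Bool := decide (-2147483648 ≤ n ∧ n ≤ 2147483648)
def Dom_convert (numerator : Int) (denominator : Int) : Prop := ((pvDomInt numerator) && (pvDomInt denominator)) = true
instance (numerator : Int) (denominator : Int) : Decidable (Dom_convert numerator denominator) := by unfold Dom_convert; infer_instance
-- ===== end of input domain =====

-- B replaces A's O(L^3) suffix-doubling cycle search (re-scanned after every digit) by classic
-- long division that records each remainder's first position in a dict: the cycle starts at the
-- first repeated remainder.  Equivalence is proved for every denominator ≠ 0 (A raises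
-- ZeroDivisionError on denominator = 0, which Pre_ excludes).

-- ===== PORT A =====
-- the inner 'for i in range(len(fraction)//2)' loop with its early return
def convertInner (fraction : List Char) (nums : List Int) : Nat → Nat → Option (List Char × List Char)
  | 0, _ => none
  | c + 1, i =>
    if PySem.List.pyRepeat (PySem.List.slice fraction (some ((fraction.length : Int) - ((i : Int) + 1))) none) 2
         = PySem.List.slice fraction (some ((fraction.length : Int) - ((i : Int) + 1) * 2)) none
       ∧ PySem.List.pyGetD nums (-((i : Int) + 1)) 0 = PySem.List.pyGetD nums (-((i : Int) + 1) * 2) 0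
    then some (PySem.List.slice fraction none (some ((fraction.length : Int) - ((i : Int) + 1) * 2)),
               PySem.List.slice fraction (some ((fraction.length : Int) - ((i : Int) + 1))) none)
    else convertInner fraction nums c (i + 1)

-- the 'while True' loop; fuel 3*|denominator|+3 is never exhausted (proved below), the fuel-0 value is unreachable
def convertLoop (denominator : Int) : Nat → Int → List Char → List Int → List Char
  | 0, _, fraction, _ => fraction
  | fuel + 1, numerator, fraction, nums =>
    let n1 := numerator * 10
    if PySem.Int.mod n1 denominator ≠ 0 then
      let fraction1 := fraction ++ PySem.Int.toChars (PySem.Int.floordiv n1 denominator)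
      let nums1 := nums ++ [n1]
      if 1 < fraction1.length then
        match convertInner fraction1 nums1 (fraction1.length / 2) 0 with
        | some (pre, cyc) => pre ++ '(' :: (cyc ++ [')'])
        | none => convertLoop denominator fuel (PySem.Int.mod n1 denominator) fraction1 nums1
      else convertLoop denominator fuel (PySem.Int.mod n1 denominator) fraction1 nums1
    else fraction ++ PySem.Int.toChars (PySem.Int.floordiv n1 denominator)

def convert (numerator : Int) (denominator : Int) : String :=
  let whole := PySem.Int.toChars (PySem.Int.floordiv numerator denominator)
  if PySem.Int.mod numerator denominator ≠ 0 then
    String.ofList (whole ++ '.' :: convertLoop denominator (3 * denominator.natAbs + 3)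
      (PySem.Int.mod numerator denominator) [] [])
  else String.ofList (whole ++ ['.'])

-- ===== PORT B =====
-- long-division loop of Source B; fuel |denominator|+2 is never exhausted (proved below)
def convertAltLoop (denominator : Int) : Nat → Int → List (List Char) → PySem.Dict Int Int → List Char
  | 0, _, digits, _ => PySem.Chars.join [] digits
  | fuel + 1, rem, digits, seen =>
    if rem ≠ 0 ∧ seen.contains rem = false then
      let seen1 := seen.insert rem (digits.length : Int)
      let rem1 := rem * 10
      let digits1 := digits ++ [PySem.Int.toChars (PySem.Int.floordiv rem1 denominator)]
      convertAltLoop denominator fuel (PySem.Int.mod rem1 denominator) digits1 seen1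
    else
      if rem = 0 then PySem.Chars.join [] digits
      else
        let p := seen.getD rem 0
        PySem.Chars.join [] (PySem.List.slice digits none (some p)) ++
          '(' :: (PySem.Chars.join [] (PySem.List.slice digits (some p) none) ++ [')'])

def convert_alt (numerator : Int) (denominator : Int) : String :=
  let whole := PySem.Int.toChars (PySem.Int.floordiv numerator denominator)
  let rem := PySem.Int.mod numerator denominator
  if rem = 0 then String.ofList (whole ++ ['.'])
  else String.ofList (whole ++ '.' :: convertAltLoop denominator (denominator.natAbs + 2) rem [] PySem.Dict.empty)

-- ===== PRECONDITION & SPEC =====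
-- Pre_ excludes only denominator = 0, on which A raises ZeroDivisionError.
def Pre_convert (numerator : Int) (denominator : Int) : Prop := denominator ≠ 0
instance (numerator : Int) (denominator : Int) : Decidable (Pre_convert numerator denominator) := by
  unfold Pre_convert; infer_instance
def pvWitness_convert : Int × Int := (1, 7)

def Spec_convert (numerator : Int) (denominator : Int) (out : String) : Prop := out = convert_alt numerator denominator
instance (numerator : Int) (denominator : Int) (out : String) : Decidable (Spec_convert numerator denominator out) := by unfold Spec_convert; infer_instance

-- ===== CLAIM (what is proved, stated in full; the proofs are below) =====
def Claim_equal_convert : Prop := ∀ (numerator : Int) (denominator : Int), Dom_convert numerator denominator → Pre_convert numerator denominator → Spec_convert numerator denominator (convert numerator denominator)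

-- ===== LEMMAS AND PROOFS =====

-- the remainder sequence of the long division of r0 by d (r0 = numerator % d)
def sseq (d r0 : Int) : Nat → Int
  | 0 => r0
  | n + 1 => PySem.Int.mod (sseq d r0 n * 10) d

-- the digit produced at step n, and the same digit as a character
def dig (d r0 : Int) (n : Nat) : Int := PySem.Int.floordiv (sseq d r0 n * 10) d
def cseq (d r0 : Int) (n : Nat) : Char := (PySem.Int.toChars (dig d r0 n)).headD '0'

-- the value range of Python's `x % d` (sign of the divisor)
def inV (d x : Int) : Prop := if 0 < d then 0 ≤ x ∧ x < d else d < x ∧ x ≤ 0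

lemma mod_inV {d : Int} (hd : d ≠ 0) (a : Int) : inV d (PySem.Int.mod a d) := by
  unfold inV
  rcases lt_or_gt_of_ne hd with h | h
  · simp only [if_neg (by omega : ¬ 0 < d)]
    exact PySem.Int.mod_neg_bounds a h
  · simp only [if_pos h]
    exact ⟨PySem.Int.mod_nonneg a h, PySem.Int.mod_lt a h⟩

lemma sseq_inV {d r0 : Int} (hd : d ≠ 0) (h0 : inV d r0) : ∀ n, inV d (sseq d r0 n)
  | 0 => h0
  | n + 1 => mod_inV hd _

lemma dig_range {d x : Int} (hd : d ≠ 0) (hx : inV d x) :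
    0 ≤ PySem.Int.floordiv (x * 10) d ∧ PySem.Int.floordiv (x * 10) d < 10 := by
  have h := PySem.Int.floordiv_mul_add_mod (x * 10) d
  have hm := mod_inV hd (x * 10)
  unfold inV at hx hm
  rcases lt_or_gt_of_ne hd with hneg | hpos
  · simp only [if_neg (by omega : ¬ 0 < d)] at hx hm
    constructor
    · by_contra hq
      push_neg at hq
      nlinarith [h, hx.1, hx.2, hm.1, hm.2]
    · by_contra hq
      push_neg at hq
      nlinarith [h, hx.1, hx.2, hm.1, hm.2]
  · simp only [if_pos hpos] at hx hm
    constructor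
    · by_contra hq
      push_neg at hq
      nlinarith [h, hx.1, hx.2, hm.1, hm.2]
    · by_contra hq
      push_neg at hq
      nlinarith [h, hx.1, hx.2, hm.1, hm.2]

lemma toChars_digit {v : Int} (h0 : 0 ≤ v) (h10 : v < 10) :
    PySem.Int.toChars v = [(PySem.Int.toChars v).headD '0'] := by
  interval_cases v <;> rfl

lemma dchar_eq {d r0 : Int} (hd : d ≠ 0) (h0 : inV d r0) (n : Nat) :
    PySem.Int.toChars (dig d r0 n) = [cseq d r0 n] := by
  have h := dig_range hd (sseq_inV hd h0 n)
  exact toChars_digit h.1 h.2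

-- shifting equal states
lemma sseq_shift {d r0 : Int} {a b : Nat} (h : sseq d r0 a = sseq d r0 b) :
    ∀ c, sseq d r0 (a + c) = sseq d r0 (b + c) := by
  intro c
  induction c with
  | zero => simpa using h
  | succ c ih =>
    have ha : a + (c + 1) = (a + c) + 1 := by omega
    have hb : b + (c + 1) = (b + c) + 1 := by omega
    rw [ha, hb]
    simp only [sseq, ih]

lemma sseq_zero_step {d r0 : Int} {n : Nat} (h : sseq d r0 n = 0) : sseq d r0 (n + 1) = 0 := by
  have : PySem.Int.mod 0 d = 0 := (PySem.Int.mod_eq_zero_iff_dvd 0 d).mpr ⟨0, by ring⟩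
  simp [sseq, h, this]

lemma sseq_zero_ge {d r0 : Int} {n m : Nat} (h : sseq d r0 n = 0) (hm : n ≤ m) : sseq d r0 m = 0 := by
  induction m with
  | zero =>
    have : n = 0 := by omega
    subst this; exact h
  | succ m ih =>
    rcases Nat.lt_or_ge n (m + 1) with h1 | h1
    · exact sseq_zero_step (ih (by omega))
    · have : n = m + 1 := by omega
      subst this; exact h

-- existence of a collision among the first |d|+1 remainders (pigeonhole)
lemma exists_col {d r0 : Int} (hd : d ≠ 0) (h0 : inV d r0) :
    ∃ n m, m < n ∧ n ≤ d.natAbs ∧ sseq d r0 m = sseq d r0 n := by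
  classical
  set V : Finset Int := if 0 < d then Finset.Ico 0 d else Finset.Ioc d 0 with hV
  have hcard : V.card = d.natAbs := by
    rcases lt_or_gt_of_ne hd with h | h
    · simp [hV, if_neg (by omega : ¬ 0 < d), Int.card_Ioc]
      omega
    · simp [hV, if_pos h, Int.card_Ico]
      omega
  have hmaps : ∀ n ∈ Finset.range (d.natAbs + 1), sseq d r0 n ∈ V := by
    intro n _
    have h := sseq_inV hd h0 n
    unfold inV at h
    rcases lt_or_gt_of_ne hd with hneg | hpos
    · simp only [if_neg (by omega : ¬ 0 < d)] at h
      simp [hV, if_neg (by omega : ¬ 0 < d), Finset.mem_Ioc, h.1, h.2]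
    · simp only [if_pos hpos] at h
      simp [hV, if_pos hpos, Finset.mem_Ico, h.1, h.2]
  have hlt : V.card < (Finset.range (d.natAbs + 1)).card := by
    simp [hcard]
  obtain ⟨i, hi, j, hj, hne, heq⟩ :=
    Finset.exists_ne_map_eq_of_card_lt_of_maps_to hlt hmaps
  simp only [Finset.mem_range] at hi hj
  rcases Nat.lt_or_ge i j with h | h
  · exact ⟨j, i, h, by omega, heq⟩
  · exact ⟨i, j, by omega, by omega, heq.symm⟩

-- the minimal pre-period p and period k
lemma exists_pk {d r0 : Int} (hd : d ≠ 0) (h0 : inV d r0) :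
    ∃ p k, 0 < k ∧ p + k ≤ d.natAbs ∧
      (∀ i j, i < j → j < p + k → sseq d r0 i ≠ sseq d r0 j) ∧
      sseq d r0 (p + k) = sseq d r0 p := by
  classical
  have hex : ∃ n, ∃ m, m < n ∧ sseq d r0 m = sseq d r0 n := by
    obtain ⟨n, m, h1, _, h3⟩ := exists_col hd h0
    exact ⟨n, m, h1, h3⟩
  set L0 := Nat.find hex with hL0
  obtain ⟨p, hp, hpe⟩ := Nat.find_spec hex
  have hpmin : ∀ j, j < L0 → ∀ i, i < j → sseq d r0 i ≠ sseq d r0 j := by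
    intro j hj i hij heq
    exact Nat.find_min hex hj ⟨i, hij, heq⟩
  refine ⟨p, L0 - p, by omega, ?_, ?_, ?_⟩
  · obtain ⟨n, m, h1, h2, h3⟩ := exists_col hd h0
    have : L0 ≤ n := Nat.find_le ⟨m, h1, h3⟩
    omega
  · intro i j hij hj heq
    exact hpmin j (by omega) i hij heq
  · have : p + (L0 - p) = L0 := by omega
    rw [this]; exact hpe.symm

-- From here on, p k are as produced by exists_pk; abbreviate the two key hypotheses.
lemma sseq_per {d r0 : Int} {p k : Nat} (hper0 : sseq d r0 (p + k) = sseq d r0 p) :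
    ∀ n, p ≤ n → sseq d r0 (n + k) = sseq d r0 n := by
  intro n hn
  have := sseq_shift hper0 (n - p)
  have h1 : p + k + (n - p) = n + k := by omega
  have h2 : p + (n - p) = n := by omega
  rwa [h1, h2] at this

lemma sseq_per_mul {d r0 : Int} {p k : Nat} (hper0 : sseq d r0 (p + k) = sseq d r0 p) :
    ∀ c n, p ≤ n → sseq d r0 (n + c * k) = sseq d r0 n := by
  intro c
  induction c with
  | zero => simp
  | succ c ih =>
    intro n hn
    have h1 : n + (c + 1) * k = (n + c * k) + k := by ring
    rw [h1, sseq_per hper0 _ (by omega), ih n hn]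

lemma sseq_canon {d r0 : Int} {p k : Nat} (hk : 0 < k)
    (hper0 : sseq d r0 (p + k) = sseq d r0 p) :
    ∀ n, p ≤ n → sseq d r0 n = sseq d r0 (p + (n - p) % k) := by
  intro n hn
  have hdm := Nat.div_add_mod (n - p) k
  have hc : ((n - p) / k) * k = k * ((n - p) / k) := Nat.mul_comm _ _
  have h1 : n = (p + (n - p) % k) + ((n - p) / k) * k := by omega
  calc sseq d r0 n = sseq d r0 ((p + (n - p) % k) + ((n - p) / k) * k) := by rw [← h1]
    _ = sseq d r0 (p + (n - p) % k) := sseq_per_mul hper0 _ _ (by omega)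

lemma sseq_eq_iff {d r0 : Int} {p k : Nat} (hk : 0 < k)
    (hinj : ∀ i j, i < j → j < p + k → sseq d r0 i ≠ sseq d r0 j)
    (hper0 : sseq d r0 (p + k) = sseq d r0 p) :
    ∀ a b, a < b → (sseq d r0 a = sseq d r0 b ↔ p ≤ a ∧ k ∣ (b - a)) := by
  intro a b hab
  constructor
  · intro heq
    have hpa : p ≤ a := by
      by_contra hpa
      push_neg at hpa
      rcases Nat.lt_or_ge b (p + k) with hb | hb
      · exact hinj a b hab hb heq
      · have hc := sseq_canon hk hper0 b (by omega)
        have hlt : p + (b - p) % k < p + k := by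
          have := Nat.mod_lt (b - p) hk
          omega
        exact hinj a (p + (b - p) % k) (by omega) hlt (heq.trans hc)
    have hca := sseq_canon hk hper0 a hpa
    have hcb := sseq_canon hk hper0 b (by omega)
    have hma := Nat.mod_lt (a - p) hk
    have hmb := Nat.mod_lt (b - p) hk
    have heqc : sseq d r0 (p + (a - p) % k) = sseq d r0 (p + (b - p) % k) := by
      rw [← hca, ← hcb]; exact heq
    have hmm : (a - p) % k = (b - p) % k := by
      by_contra hne
      rcases Nat.lt_or_ge ((a - p) % k) ((b - p) % k) with h | h
      · exact hinj _ _ (by omega) (by omega) heqc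
      · exact hinj _ _ (by omega) (by omega) heqc.symm
    refine ⟨hpa, ?_⟩
    have : (a - p) ≡ (b - p) [MOD k] := hmm
    have hd2 := (Nat.modEq_iff_dvd' (by omega : a - p ≤ b - p)).mp this
    have : b - p - (a - p) = b - a := by omega
    rwa [this] at hd2
  · rintro ⟨hpa, c, hc⟩
    have hck : c * k = k * c := Nat.mul_comm _ _
    have hb : b = a + c * k := by omega
    subst hb
    exact (sseq_per_mul hper0 c a hpa).symm

-- zero remainders
lemma sseq_zero_p {d r0 : Int} {p k : Nat} (hk : 0 < k)
    (hinj : ∀ i j, i < j → j < p + k → sseq d r0 i ≠ sseq d r0 j)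
    (hper0 : sseq d r0 (p + k) = sseq d r0 p) {n : Nat} (h : sseq d r0 n = 0) :
    sseq d r0 p = 0 := by
  rcases Nat.lt_or_ge n p with hn | hn
  · exact sseq_zero_ge h (by omega)
  · have hc := sseq_canon hk hper0 n hn
    have hm := Nat.mod_lt (n - p) hk
    have h2 : sseq d r0 (p + (n - p) % k) = 0 := by rw [← hc]; exact h
    have h3 : sseq d r0 (p + k) = 0 := sseq_zero_ge h2 (by omega)
    rw [hper0] at h3
    exact h3

lemma sseq_ne_zero_lt_p {d r0 : Int} {p k : Nat} (hk : 0 < k)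
    (hinj : ∀ i j, i < j → j < p + k → sseq d r0 i ≠ sseq d r0 j)
    {m : Nat} (hm : m < p) : sseq d r0 m ≠ 0 := by
  intro h
  have h1 : sseq d r0 (m + 1) = 0 := sseq_zero_step h
  exact hinj m (m + 1) (by omega) (by omega) (by rw [h, h1])

lemma sseq_nt {d r0 : Int} {p k : Nat} (hk : 0 < k)
    (hinj : ∀ i j, i < j → j < p + k → sseq d r0 i ≠ sseq d r0 j)
    (hper0 : sseq d r0 (p + k) = sseq d r0 p) (hz : sseq d r0 p ≠ 0) :
    ∀ n, sseq d r0 n ≠ 0 := by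
  intro n h
  exact hz (sseq_zero_p hk hinj hper0 h)


-- ===== loop-state abbreviations =====
def fracN (d r0 : Int) (j : Nat) : List Char := (List.range j).map (cseq d r0)
def numsN (d r0 : Int) (j : Nat) : List Int := (List.range j).map (fun t => sseq d r0 t * 10)
def digitsN (d r0 : Int) (j : Nat) : List (List Char) := (List.range j).map (fun t => [cseq d r0 t])
def seenN (d r0 : Int) : Nat → PySem.Dict Int Int
  | 0 => PySem.Dict.empty
  | j + 1 => (seenN d r0 j).insert (sseq d r0 j) (j : Int)

lemma fracN_succ (d r0 : Int) (j : Nat) : fracN d r0 (j + 1) = fracN d r0 j ++ [cseq d r0 j] := by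
  simp [fracN, List.range_succ]
lemma numsN_succ (d r0 : Int) (j : Nat) : numsN d r0 (j + 1) = numsN d r0 j ++ [sseq d r0 j * 10] := by
  simp [numsN, List.range_succ]
lemma digitsN_succ (d r0 : Int) (j : Nat) : digitsN d r0 (j + 1) = digitsN d r0 j ++ [[cseq d r0 j]] := by
  simp [digitsN, List.range_succ]
lemma fracN_length (d r0 : Int) (j : Nat) : (fracN d r0 j).length = j := by simp [fracN]

lemma fracN_drop (d r0 : Int) {a j : Nat} (h : a ≤ j) :
    (fracN d r0 j).drop a = (List.range' a (j - a)).map (cseq d r0) := by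
  rw [fracN, ← List.map_drop, List.range_eq_range', List.drop_range']
  simp
lemma fracN_take (d r0 : Int) {a j : Nat} (h : a ≤ j) :
    (fracN d r0 j).take a = fracN d r0 a := by
  rw [fracN, ← List.map_take, List.take_range, Nat.min_eq_left h, fracN]

lemma pyGetD_numsN (d r0 : Int) {L m : Nat} (h1 : 1 ≤ m) (h2 : m ≤ L) :
    PySem.List.pyGetD (numsN d r0 L) (-(m : Int)) 0 = sseq d r0 (L - m) * 10 := by
  have hlen : (numsN d r0 L).length = L := by simp [numsN]
  rw [PySem.List.pyGetD_neg_natCast _ m _ h1 (by omega)]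
  simp [numsN]

-- the periodic shift of the digit characters
lemma map_cseq_shift {d r0 : Int} {p k : Nat}
    (hper0 : sseq d r0 (p + k) = sseq d r0 p) :
    (List.range' (p + k) k).map (cseq d r0) = (List.range' p k).map (cseq d r0) := by
  have h1 : List.range' (p + k) k = List.map (fun x => k + x) (List.range' p k) := by
    rw [List.map_add_range']; ring_nf
  rw [h1, List.map_map]
  apply List.map_congr_left
  intro x hx
  rw [List.mem_range'_1] at hx
  have hs : sseq d r0 (x + k) = sseq d r0 x := sseq_per hper0 x hx.1
  simp only [Function.comp_apply]
  have : k + x = x + k := by omega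
  rw [this]
  unfold cseq dig
  rw [hs]

-- ===== the inner cycle-detection loop of A =====
lemma inner_cond_iff {d r0 : Int} {p k : Nat} (hk : 0 < k)
    (hinj : ∀ i j, i < j → j < p + k → sseq d r0 i ≠ sseq d r0 j)
    (hper0 : sseq d r0 (p + k) = sseq d r0 p)
    {L i : Nat} (hL : 2 * (i + 1) ≤ L) :
    (PySem.List.pyGetD (numsN d r0 L) (-((i : Int) + 1)) 0
       = PySem.List.pyGetD (numsN d r0 L) (-((i : Int) + 1) * 2) 0)
      ↔ (p ≤ L - 2 * (i + 1) ∧ k ∣ (i + 1)) := by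
  have e1 : (-((i : Int) + 1)) = -(((i + 1 : Nat) : Int)) := by push_cast; ring
  have e2 : (-((i : Int) + 1) * 2) = -(((2 * (i + 1) : Nat) : Int)) := by push_cast; ring
  rw [e2, e1, pyGetD_numsN d r0 (by omega) (by omega), pyGetD_numsN d r0 (by omega) (by omega)]
  constructor
  · intro h
    have hs : sseq d r0 (L - (i + 1)) = sseq d r0 (L - 2 * (i + 1)) := by omega
    have := (sseq_eq_iff hk hinj hper0 (L - 2 * (i + 1)) (L - (i + 1)) (by omega)).mp hs.symm
    have harith : (L - (i + 1)) - (L - 2 * (i + 1)) = i + 1 := by omega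
    rw [harith] at this
    exact this
  · rintro ⟨h1, h2⟩
    have harith : (L - (i + 1)) - (L - 2 * (i + 1)) = i + 1 := by omega
    have := (sseq_eq_iff hk hinj hper0 (L - 2 * (i + 1)) (L - (i + 1)) (by omega)).mpr
      ⟨h1, by rw [harith]; exact h2⟩
    omega

lemma inner_none {d r0 : Int} {p k : Nat} (hk : 0 < k)
    (hinj : ∀ i j, i < j → j < p + k → sseq d r0 i ≠ sseq d r0 j)
    (hper0 : sseq d r0 (p + k) = sseq d r0 p) {L : Nat} :
    ∀ c i, i + c ≤ L / 2 →
      (∀ i', i ≤ i' → i' < i + c → ¬ (p ≤ L - 2 * (i' + 1) ∧ k ∣ (i' + 1))) →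
      convertInner (fracN d r0 L) (numsN d r0 L) c i = none := by
  intro c
  induction c with
  | zero => intro i _ _; rfl
  | succ c ih =>
    intro i hle hno
    rw [convertInner, if_neg, ih (i + 1) (by omega) (fun i' h1 h2 => hno i' (by omega) (by omega))]
    rintro ⟨-, hnum⟩
    have hcond := (inner_cond_iff hk hinj hper0 (by omega : 2 * (i + 1) ≤ L)).mp hnum
    exact hno i (by omega) (by omega) hcond

lemma inner_ret {d r0 : Int} {p k : Nat} (hk : 0 < k)
    (hinj : ∀ i j, i < j → j < p + k → sseq d r0 i ≠ sseq d r0 j)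
    (hper0 : sseq d r0 (p + k) = sseq d r0 p) :
    ∀ c i, i + c = (p + 2 * k) / 2 → i ≤ k - 1 →
      convertInner (fracN d r0 (p + 2 * k)) (numsN d r0 (p + 2 * k)) c i
        = some (fracN d r0 p, (List.range' (p + k) k).map (cseq d r0)) := by
  intro c
  induction c with
  | zero => intro i h1 h2; omega
  | succ c ih =>
    intro i h1 h2
    rcases Nat.lt_or_ge i (k - 1) with hi | hi
    · -- this i fails: k does not divide i+1 (0 < i+1 < k)
      rw [convertInner, if_neg, ih (i + 1) (by omega) (by omega)]
      rintro ⟨-, hnum⟩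
      have hcond := (inner_cond_iff hk hinj hper0 (by omega : 2 * (i + 1) ≤ p + 2 * k)).mp hnum
      obtain ⟨-, hdvd⟩ := hcond
      have := Nat.le_of_dvd (by omega) hdvd
      omega
    · -- i = k - 1: the condition fires
      have hik : i = k - 1 := by omega
      subst hik
      rw [convertInner, if_pos]
      · rw [fracN_length]
        have ea : ((p + 2 * k : Nat) : Int) - (((k - 1 : Nat) : Int) + 1) = ((p + k : Nat) : Int) := by omega
        have eb : (((p + 2 * k : Nat) : Int) - (((k - 1 : Nat) : Int) + 1) * 2) = ((p : Nat) : Int) := by omega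
        rw [ea, eb, PySem.List.slice_from _ (by omega), PySem.List.slice_to _ (by omega)]
        rw [Int.toNat_natCast, Int.toNat_natCast]
        rw [fracN_drop d r0 (by omega), fracN_take d r0 (by omega)]
        have : p + 2 * k - (p + k) = k := by omega
        rw [this]
      · constructor
        · rw [fracN_length]
          have ea : ((p + 2 * k : Nat) : Int) - (((k - 1 : Nat) : Int) + 1) = ((p + k : Nat) : Int) := by omega
          have eb : (((p + 2 * k : Nat) : Int) - (((k - 1 : Nat) : Int) + 1) * 2) = ((p : Nat) : Int) := by omega
          rw [ea, eb, PySem.List.slice_from _ (by omega), PySem.List.slice_from _ (by omega)]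
          rw [Int.toNat_natCast, Int.toNat_natCast]
          rw [fracN_drop d r0 (by omega), fracN_drop d r0 (by omega)]
          have h2k : p + 2 * k - (p + k) = k := by omega
          have h2k' : p + 2 * k - p = k + k := by omega
          rw [h2k, h2k']
          have hsplit : List.range' p (k + k) = List.range' p k ++ List.range' (p + k) k := by
            have := @List.range'_append p k k 1
            simpa using this.symm
          rw [hsplit, List.map_append, map_cseq_shift hper0]
          have hrep : ∀ xs : List Char, PySem.List.pyRepeat xs 2 = xs ++ xs := by
            intro xs; simp [PySem.List.pyRepeat]
          rw [hrep]
        · have hL2 : 2 * ((k - 1) + 1) ≤ p + 2 * k := by omega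
          rw [inner_cond_iff hk hinj hper0 hL2]
          constructor
          · omega
          · have : (k - 1) + 1 = k := by omega
            rw [this]

-- ===== the outer while-loop of A =====
lemma aLoopT {d r0 : Int} {p k : Nat} (hd : d ≠ 0) (h0 : inV d r0) (hk : 0 < k)
    (hinj : ∀ i j, i < j → j < p + k → sseq d r0 i ≠ sseq d r0 j)
    (hper0 : sseq d r0 (p + k) = sseq d r0 p) (hzp : sseq d r0 p = 0) :
    ∀ c j fuel, j + c = p → c ≤ fuel → 0 < c →
      convertLoop d fuel (sseq d r0 j) (fracN d r0 j) (numsN d r0 j) = fracN d r0 p := by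
  intro c
  induction c with
  | zero => omega
  | succ c ih =>
    intro j fuel hjc hfuel _
    obtain ⟨f, rfl⟩ : ∃ f, fuel = f + 1 := ⟨fuel - 1, by omega⟩
    rw [convertLoop]
    simp only
    have hstep : PySem.Int.mod (sseq d r0 j * 10) d = sseq d r0 (j + 1) := rfl
    have hd1 : PySem.Int.toChars (PySem.Int.floordiv (sseq d r0 j * 10) d) = [cseq d r0 j] :=
      dchar_eq hd h0 j
    rcases Nat.eq_or_lt_of_le (by omega : j + 1 ≤ p) with hjp | hjp
    · -- last step: the next remainder is zero, A returns in the else branch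
      have hz : sseq d r0 (j + 1) = 0 := by rw [hjp]; exact hzp
      rw [if_neg (by rw [hstep, hz]; simp)]
      rw [hd1, ← fracN_succ, hjp]
    · -- intermediate step: next remainder non-zero, no cycle found yet
      have hnz : sseq d r0 (j + 1) ≠ 0 := sseq_ne_zero_lt_p hk hinj (by omega)
      rw [if_pos (by rw [hstep]; exact hnz)]
      rw [hd1, ← fracN_succ, ← numsN_succ, fracN_length, hstep]
      have hnone : convertInner (fracN d r0 (j + 1)) (numsN d r0 (j + 1)) ((j + 1) / 2) 0 = none := by
        apply inner_none hk hinj hper0 _ 0 (by omega)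
        intro i' _ hi'
        rintro ⟨hp1, -⟩
        omega
      split
      · rw [hnone]
        exact ih (j + 1) f (by omega) (by omega) (by omega)
      · exact ih (j + 1) f (by omega) (by omega) (by omega)

lemma aLoopNT {d r0 : Int} {p k : Nat} (hd : d ≠ 0) (h0 : inV d r0) (hk : 0 < k)
    (hinj : ∀ i j, i < j → j < p + k → sseq d r0 i ≠ sseq d r0 j)
    (hper0 : sseq d r0 (p + k) = sseq d r0 p) (hzp : sseq d r0 p ≠ 0) :
    ∀ c j fuel, j + c = p + 2 * k → c ≤ fuel → 0 < c →
      convertLoop d fuel (sseq d r0 j) (fracN d r0 j) (numsN d r0 j)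
        = fracN d r0 p ++ '(' :: ((List.range' (p + k) k).map (cseq d r0) ++ [')']) := by
  intro c
  induction c with
  | zero => omega
  | succ c ih =>
    intro j fuel hjc hfuel _
    obtain ⟨f, rfl⟩ : ∃ f, fuel = f + 1 := ⟨fuel - 1, by omega⟩
    rw [convertLoop]
    simp only
    have hstep : PySem.Int.mod (sseq d r0 j * 10) d = sseq d r0 (j + 1) := rfl
    have hd1 : PySem.Int.toChars (PySem.Int.floordiv (sseq d r0 j * 10) d) = [cseq d r0 j] :=
      dchar_eq hd h0 j
    have hnz : sseq d r0 (j + 1) ≠ 0 := sseq_nt hk hinj hper0 hzp (j + 1)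
    rw [if_pos (by rw [hstep]; exact hnz)]
    rw [hd1, ← fracN_succ, ← numsN_succ, fracN_length, hstep]
    rcases Nat.eq_or_lt_of_le (by omega : j + 1 ≤ p + 2 * k) with hjp | hjp
    · -- last step: the cycle check fires
      rw [if_pos (by omega), hjp]
      rw [inner_ret hk hinj hper0 ((p + 2 * k) / 2) 0 (by omega) (by omega)]
    · -- intermediate step: cycle check finds nothing
      have hnone : convertInner (fracN d r0 (j + 1)) (numsN d r0 (j + 1)) ((j + 1) / 2) 0 = none := by
        apply inner_none hk hinj hper0 _ 0 (by omega)
        intro i' _ hi'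
        rintro ⟨hp1, hdvd⟩
        have := Nat.le_of_dvd (by omega) hdvd
        omega
      split
      · rw [hnone]
        exact ih (j + 1) f (by omega) (by omega) (by omega)
      · exact ih (j + 1) f (by omega) (by omega) (by omega)

-- ===== the dict built by B =====
lemma seenN_get?_none {d r0 x : Int} {j : Nat} (h : ∀ t, t < j → sseq d r0 t ≠ x) :
    (seenN d r0 j).get? x = none := by
  induction j with
  | zero => rfl
  | succ j ih =>
    rw [seenN, PySem.Dict.get?_insert_of_ne _ _ (fun he => h j (by omega) he.symm)]
    exact ih (fun t ht => h t (by omega))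

lemma seenN_get?_p {d r0 : Int} {p j : Nat} (hj : p < j)
    (h : ∀ t, p < t → t < j → sseq d r0 t ≠ sseq d r0 p) :
    (seenN d r0 j).get? (sseq d r0 p) = some (p : Int) := by
  induction j with
  | zero => omega
  | succ j ih =>
    rcases Nat.eq_or_lt_of_le (by omega : p + 1 ≤ j + 1) with hpj | hpj
    · have : p = j := by omega
      subst this
      rw [seenN, PySem.Dict.get?_insert_self]
    · rw [seenN, PySem.Dict.get?_insert_of_ne _ _ (Ne.symm (h j (by omega) (by omega)))]
      exact ih (by omega) (fun t h1 h2 => h t h1 (by omega))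

lemma join_digitsN {d r0 : Int} (l : List Nat) :
    PySem.Chars.join [] (l.map (fun t => [cseq d r0 t])) = l.map (cseq d r0) := by
  have : l.map (fun t => [cseq d r0 t]) = (l.map (cseq d r0)).map (fun c => [c]) := by
    rw [List.map_map]; rfl
  rw [this, PySem.Chars.join_nil_singletons]

-- ===== the long-division loop of B =====
lemma bLoopT {d r0 : Int} {p k : Nat} (hd : d ≠ 0) (h0 : inV d r0) (hk : 0 < k)
    (hinj : ∀ i j, i < j → j < p + k → sseq d r0 i ≠ sseq d r0 j)
    (hzp : sseq d r0 p = 0) :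
    ∀ c j fuel, j + c = p + 1 → c ≤ fuel → 0 < c →
      convertAltLoop d fuel (sseq d r0 j) (digitsN d r0 j) (seenN d r0 j) = fracN d r0 p := by
  intro c
  induction c with
  | zero => omega
  | succ c ih =>
    intro j fuel hjc hfuel _
    obtain ⟨f, rfl⟩ : ∃ f, fuel = f + 1 := ⟨fuel - 1, by omega⟩
    rw [convertAltLoop]
    simp only
    rcases Nat.eq_or_lt_of_le (by omega : j ≤ p) with hjp | hjp
    · -- j = p: remainder zero, loop exits and joins the digits
      subst hjp
      rw [if_neg (by rw [hzp]; simp), if_pos hzp]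
      exact join_digitsN _
    · -- j < p: fresh non-zero remainder, the loop continues
      have hnz : sseq d r0 j ≠ 0 := sseq_ne_zero_lt_p hk hinj hjp
      have hfresh : (seenN d r0 j).get? (sseq d r0 j) = none :=
        seenN_get?_none (fun t ht => hinj t j ht (by omega))
      rw [if_pos ⟨hnz, by rw [PySem.Dict.contains_eq_isSome_get?, hfresh]; rfl⟩]
      have hd1 : PySem.Int.toChars (PySem.Int.floordiv (sseq d r0 j * 10) d) = [cseq d r0 j] :=
        dchar_eq hd h0 j
      have hlen : (digitsN d r0 j).length = j := by simp [digitsN]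
      rw [hd1, hlen, ← digitsN_succ]
      have hstep : PySem.Int.mod (sseq d r0 j * 10) d = sseq d r0 (j + 1) := rfl
      rw [hstep, ← seenN]
      exact ih (j + 1) f (by omega) (by omega) (by omega)

lemma bLoopNT {d r0 : Int} {p k : Nat} (hd : d ≠ 0) (h0 : inV d r0) (hk : 0 < k)
    (hinj : ∀ i j, i < j → j < p + k → sseq d r0 i ≠ sseq d r0 j)
    (hper0 : sseq d r0 (p + k) = sseq d r0 p) (hzp : sseq d r0 p ≠ 0) :
    ∀ c j fuel, j + c = p + k + 1 → c ≤ fuel → 0 < c →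
      convertAltLoop d fuel (sseq d r0 j) (digitsN d r0 j) (seenN d r0 j)
        = fracN d r0 p ++ '(' :: ((List.range' p k).map (cseq d r0) ++ [')']) := by
  intro c
  induction c with
  | zero => omega
  | succ c ih =>
    intro j fuel hjc hfuel _
    obtain ⟨f, rfl⟩ : ∃ f, fuel = f + 1 := ⟨fuel - 1, by omega⟩
    rw [convertAltLoop]
    simp only
    rcases Nat.eq_or_lt_of_le (by omega : j ≤ p + k) with hjp | hjp
    · -- j = p + k: the remainder repeats, cycle found
      subst hjp
      have hnz : sseq d r0 (p + k) ≠ 0 := sseq_nt hk hinj hper0 hzp _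
      have hget : (seenN d r0 (p + k)).get? (sseq d r0 (p + k)) = some (p : Int) := by
        rw [hper0]
        exact seenN_get?_p (by omega) (fun t h1 h2 he => hinj p t h1 h2 he.symm)
      have hmem : (seenN d r0 (p + k)).contains (sseq d r0 (p + k)) = true := by
        rw [PySem.Dict.contains_eq_isSome_get?, hget]; rfl
      rw [if_neg (by rintro ⟨-, hc⟩; rw [hmem] at hc; exact absurd hc (by simp))]
      rw [if_neg hnz]
      have hgetD : (seenN d r0 (p + k)).getD (sseq d r0 (p + k)) 0 = (p : Int) := by
        rw [PySem.Dict.getD_eq_get?_getD, hget]; rfl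
      rw [hgetD, PySem.List.slice_to _ (by omega), PySem.List.slice_from _ (by omega)]
      rw [Int.toNat_natCast]
      have htake : (digitsN d r0 (p + k)).take p = (List.range p).map (fun t => [cseq d r0 t]) := by
        rw [digitsN, ← List.map_take, List.take_range, Nat.min_eq_left (by omega)]
      have hdrop : (digitsN d r0 (p + k)).drop p = (List.range' p k).map (fun t => [cseq d r0 t]) := by
        rw [digitsN, ← List.map_drop, List.range_eq_range', List.drop_range']
        simp
      rw [htake, hdrop, join_digitsN, join_digitsN]
      rfl
    · -- j < p + k: fresh remainder, the loop continues
      have hnz : sseq d r0 j ≠ 0 := sseq_nt hk hinj hper0 hzp j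
      have hfresh : (seenN d r0 j).get? (sseq d r0 j) = none :=
        seenN_get?_none (fun t ht => hinj t j ht (by omega))
      rw [if_pos ⟨hnz, by rw [PySem.Dict.contains_eq_isSome_get?, hfresh]; rfl⟩]
      have hd1 : PySem.Int.toChars (PySem.Int.floordiv (sseq d r0 j * 10) d) = [cseq d r0 j] :=
        dchar_eq hd h0 j
      have hlen : (digitsN d r0 j).length = j := by simp [digitsN]
      rw [hd1, hlen, ← digitsN_succ]
      have hstep : PySem.Int.mod (sseq d r0 j * 10) d = sseq d r0 (j + 1) := rfl
      rw [hstep, ← seenN]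
      exact ih (j + 1) f (by omega) (by omega) (by omega)

-- ===== VERDICT (by name: the statement is the Claim_ definition above) =====
theorem convert_spec : Claim_equal_convert := by
  unfold Claim_equal_convert Spec_convert Pre_convert
  intro n d _ hd
  simp only [convert, convert_alt]
  by_cases hz : PySem.Int.mod n d = 0
  · rw [if_neg (by simpa using hz), if_pos hz]
  · rw [if_pos hz, if_neg hz]
    have h0 : inV d (PySem.Int.mod n d) := mod_inV hd n
    obtain ⟨p, k, hk, hbound, hinj, hper0⟩ := exists_pk hd h0
    have hs0 : sseq d (PySem.Int.mod n d) 0 = PySem.Int.mod n d := rfl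
    by_cases hzp : sseq d (PySem.Int.mod n d) p = 0
    · -- terminating expansion
      have hp : 0 < p := by
        rcases Nat.eq_zero_or_pos p with h | h
        · exact absurd (by rw [← hs0, ← h]; exact hzp) hz
        · exact h
      have hA := aLoopT hd h0 hk hinj hper0 hzp p 0 (3 * d.natAbs + 3)
        (by omega) (by omega) (by omega)
      have hB := bLoopT hd h0 hk hinj hzp (p + 1) 0 (d.natAbs + 2)
        (by omega) (by omega) (by omega)
      simp only [hs0, fracN, numsN, digitsN, seenN, List.range_zero, List.map_nil] at hA hB
      rw [hA, hB]
    · -- repeating expansion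
      have hA := aLoopNT hd h0 hk hinj hper0 hzp (p + 2 * k) 0 (3 * d.natAbs + 3)
        (by omega) (by omega) (by omega)
      have hB := bLoopNT hd h0 hk hinj hper0 hzp (p + k + 1) 0 (d.natAbs + 2)
        (by omega) (by omega) (by omega)
      rw [map_cseq_shift hper0] at hA
      simp only [hs0, fracN, numsN, digitsN, seenN, List.range_zero, List.map_nil] at hA hB
      rw [hA, hB]
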